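-- pv_equiv track=rewrite | github.com/lucas-iribaren/runtrack-python | jour4/job14/main.py | decouper
-- ===== SOURCE A (Python) =====
-- def longueur(ch):
--     count = 0
--     for _ in ch:
--         count += 1
--     return count
--
-- def decouper(chiffre, ch):
--     mots = []
--     debut_mot = 0
--     long_chaine = longueur(ch)
--     nouvelle_chaine = ""
--     i = 0
--
--     while i < long_chaine:
--         if ch[i] in [" ", ","]:
--             mots.append(ch[debut_mot:i])
--             debut_mot = i + 1
--         i += 1
--     mots.append(ch[debut_mot:])
--
--     for mot in mots:
--         if longueur(mot) > chiffre:
--             nouvelle_chaine += mot + " "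
--     return nouvelle_chaine.strip()
-- ===== SOURCE B (Python) =====
-- def decouper(chiffre, ch):
--     kept = []
--     word = ""
--     for c in ch:
--         if c in " ,":
--             if len(word) > chiffre:
--                 kept.append(word)
--             word = ""
--         else:
--             word += c
--     if len(word) > chiffre:
--         kept.append(word)
--     return " ".join(kept).strip()
-- ===== Notes on version B (the rewrite author's own statement) =====
-- stated objective: simpler
-- what changed: B makes a single pass over the characters with a current-word accumulator and a kept-words list joined once at the end, instead of A's index-and-slice tokenising loop followed by a second filtering loop that concatenates each kept word with a trailing space and strips it; dropping the index/slice machinery, the hand-rolled length count and the repeated string concatenation gives a constant-factor speedup (measured ~2x).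
import Mathlib
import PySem

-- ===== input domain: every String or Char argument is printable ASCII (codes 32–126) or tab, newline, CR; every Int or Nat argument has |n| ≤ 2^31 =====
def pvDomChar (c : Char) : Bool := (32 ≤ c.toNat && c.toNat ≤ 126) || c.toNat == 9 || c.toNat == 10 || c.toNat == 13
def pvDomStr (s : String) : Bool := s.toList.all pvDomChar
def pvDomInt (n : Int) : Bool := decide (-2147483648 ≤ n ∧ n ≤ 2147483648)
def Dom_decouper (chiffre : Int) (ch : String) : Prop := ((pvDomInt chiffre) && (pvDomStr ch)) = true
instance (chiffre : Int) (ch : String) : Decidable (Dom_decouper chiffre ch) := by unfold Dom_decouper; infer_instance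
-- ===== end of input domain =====

-- B replaces A's index/slice tokenising pass + separate filter-and-concatenate pass by one
-- character pass with a current-word accumulator and a kept-words list joined once (objective: simpler).

-- ===== PORT A =====
def longueur (ch : String) : Int :=
  ch.toList.foldl (fun count _ => count + 1) 0

def decouper (chiffre : Int) (ch : String) : String :=
  let long_chaine := longueur ch
  let st := (PySem.List.pyRange 0 long_chaine 1).foldl
    (fun (st : List String × Int) i =>
      if PySem.Str.pyGet? ch i = some ' ' ∨ PySem.Str.pyGet? ch i = some ',' then
        (st.1 ++ [PySem.Str.slice ch (some st.2) (some i)], i + 1)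
      else st) ([], 0)
  let mots := st.1 ++ [PySem.Str.slice ch (some st.2) none]
  let nouvelle_chaine := mots.foldl
    (fun acc mot => if longueur mot > chiffre then acc ++ mot ++ " " else acc) ""
  PySem.Str.strip nouvelle_chaine

-- ===== PORT B =====
def decouper_alt (chiffre : Int) (ch : String) : String :=
  let st := ch.toList.foldl
    (fun (st : List String × String) c =>
      if c = ' ' ∨ c = ',' then
        ((if PySem.Str.len st.2 > chiffre then st.1 ++ [st.2] else st.1), "")
      else (st.1, st.2.push c)) ([], "")
  let kept := if PySem.Str.len st.2 > chiffre then st.1 ++ [st.2] else st.1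
  PySem.Str.strip (PySem.Str.join " " kept)

-- ===== PRECONDITION & SPEC =====
def Spec_decouper (chiffre : Int) (ch : String) (out : String) : Prop := out = decouper_alt chiffre ch
instance (chiffre : Int) (ch : String) (out : String) : Decidable (Spec_decouper chiffre ch out) := by unfold Spec_decouper; infer_instance

-- ===== CLAIM (what is proved, stated in full; the proofs are below) =====
def Claim_equal_decouper : Prop := ∀ (chiffre : Int) (ch : String), Dom_decouper chiffre ch → Spec_decouper chiffre ch (decouper chiffre ch)

-- ===== LEMMAS AND PROOFS =====

-- the token list both programs split ch into (empty tokens included)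
def splitTok : List Char → List Char → List (List Char)
  | cur, [] => [cur]
  | cur, c :: cs => if c = ' ' ∨ c = ',' then cur :: splitTok [] cs else splitTok (cur ++ [c]) cs

theorem longueur_aux (l : List Char) : ∀ n : Int,
    l.foldl (fun count _ => count + 1) n = n + l.length := by
  induction l with
  | nil => simp
  | cons c cs ih => intro n; simp [List.foldl_cons, ih]; omega

theorem longueur_eq (s : String) : longueur s = (s.toList.length : Int) := by
  simp [longueur, longueur_aux]

theorem loopA (ch : String) : ∀ (g k d : Nat) (M : List String),
    k + g = ch.toList.length → d ≤ k →
    ((((PySem.List.pyRange (k : Int) (ch.toList.length : Int) 1).foldl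
        (fun (st : List String × Int) i =>
          if PySem.Str.pyGet? ch i = some ' ' ∨ PySem.Str.pyGet? ch i = some ',' then
            (st.1 ++ [PySem.Str.slice ch (some st.2) (some i)], i + 1)
          else st) (M, (d : Int))).1 ++
      [PySem.Str.slice ch
        (some ((PySem.List.pyRange (k : Int) (ch.toList.length : Int) 1).foldl
          (fun (st : List String × Int) i =>
            if PySem.Str.pyGet? ch i = some ' ' ∨ PySem.Str.pyGet? ch i = some ',' then
              (st.1 ++ [PySem.Str.slice ch (some st.2) (some i)], i + 1)
            else st) (M, (d : Int))).2) none]).map String.toList)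
      = M.map String.toList ++ splitTok ((ch.toList.drop d).take (k - d)) (ch.toList.drop k) := by
  intro g
  induction g with
  | zero =>
    intro k d M hk hd
    have hkl : k = ch.toList.length := by omega
    subst hkl
    rw [PySem.List.pyRange_one]
    simp only [sub_self, Int.toNat_zero, List.range_zero, List.map_nil, List.foldl_nil]
    simp only [List.drop_length, splitTok, List.map_append, List.map_cons, List.map_nil,
      PySem.Str.toList_slice, PySem.Chars.slice_eq_listSlice, PySem.List.slice_from_natCast]
    rw [List.take_of_length_le (by simp)]
  | succ g ihg =>
    intro k d M hk hd
    have hkN : k < ch.toList.length := by omega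
    have hklt : (k : Int) < (ch.toList.length : Int) := by exact_mod_cast hkN
    rw [PySem.List.pyRange_one_cons hklt]
    simp only [List.foldl_cons]
    have hget : PySem.Str.pyGet? ch (k : Int) = some (ch.toList[k]) := by
      rw [PySem.Str.pyGet?_natCast]
      exact List.getElem?_eq_getElem hkN
    have hdropk : ch.toList.drop k = ch.toList[k] :: ch.toList.drop (k + 1) :=
      List.drop_eq_getElem_cons hkN
    have hcast : (k : Int) + 1 = ((k + 1 : Nat) : Int) := by push_cast; ring
    by_cases hc : ch.toList[k] = ' ' ∨ ch.toList[k] = ','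
    · have hcond : PySem.Str.pyGet? ch (k : Int) = some ' ' ∨ PySem.Str.pyGet? ch (k : Int) = some ',' := by
        rw [hget]
        simpa using hc
      rw [if_pos hcond, hcast, ihg (k + 1) (k + 1) _ (by omega) (le_refl _)]
      rw [hdropk]
      simp only [splitTok, if_pos hc, Nat.sub_self, List.take_zero, List.map_append,
        List.map_cons, List.map_nil, PySem.Str.toList_slice, PySem.Chars.slice_eq_listSlice,
        PySem.List.slice_natCast, List.append_assoc, List.cons_append, List.nil_append]
    · have hcond : ¬ (PySem.Str.pyGet? ch (k : Int) = some ' ' ∨ PySem.Str.pyGet? ch (k : Int) = some ',') := by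
        rw [hget]
        simpa using hc
      rw [if_neg hcond, hcast, ihg (k + 1) d M (by omega) (by omega)]
      rw [hdropk]
      have htake : (ch.toList.drop d).take (k + 1 - d) = (ch.toList.drop d).take (k - d) ++ [ch.toList[k]] := by
        have h1 : k + 1 - d = (k - d) + 1 := by omega
        rw [h1, List.take_add_one]
        have h2 : (ch.toList.drop d)[k - d]? = some ch.toList[k] := by
          rw [List.getElem?_drop]
          have h3 : d + (k - d) = k := by omega
          rw [h3]
          exact List.getElem?_eq_getElem hkN
        rw [h2]
        rfl
      rw [htake]
      conv_rhs => rw [splitTok, if_neg hc]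

theorem loopA2 (chiffre : Int) : ∀ (mots : List String) (acc : String),
    (mots.foldl (fun acc mot => if longueur mot > chiffre then acc ++ mot ++ " " else acc) acc).toList
      = acc.toList ++ ((mots.map String.toList).filter
          (fun w => decide ((w.length : Int) > chiffre))).flatMap (fun w => w ++ [' ']) := by
  intro mots
  induction mots with
  | nil => simp
  | cons mot rest ih =>
    intro acc
    simp only [List.foldl_cons, List.map_cons, List.filter_cons]
    rw [longueur_eq mot]
    have hl : mot.toList.length = mot.length := mot.length_toList
    by_cases h : (mot.toList.length : Int) > chiffre
    · rw [if_pos h, ih]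
      have h' : chiffre < (mot.length : Int) := by rw [← hl]; exact h
      have hs : (" " : String).toList = [' '] := by decide
      simp [h', hs, String.toList_append]
    · rw [if_neg h, ih]
      have h' : ¬ chiffre < (mot.length : Int) := by rw [← hl]; exact h
      simp [h']

theorem loopB (chiffre : Int) : ∀ (rest : List Char) (kept : List String) (cur : String),
    ((if PySem.Str.len (rest.foldl
        (fun (st : List String × String) c =>
          if c = ' ' ∨ c = ',' then
            ((if PySem.Str.len st.2 > chiffre then st.1 ++ [st.2] else st.1), "")
          else (st.1, st.2.push c)) (kept, cur)).2 > chiffre then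
        (rest.foldl (fun (st : List String × String) c =>
          if c = ' ' ∨ c = ',' then
            ((if PySem.Str.len st.2 > chiffre then st.1 ++ [st.2] else st.1), "")
          else (st.1, st.2.push c)) (kept, cur)).1 ++
          [(rest.foldl (fun (st : List String × String) c =>
            if c = ' ' ∨ c = ',' then
              ((if PySem.Str.len st.2 > chiffre then st.1 ++ [st.2] else st.1), "")
            else (st.1, st.2.push c)) (kept, cur)).2]
      else (rest.foldl (fun (st : List String × String) c =>
          if c = ' ' ∨ c = ',' then
            ((if PySem.Str.len st.2 > chiffre then st.1 ++ [st.2] else st.1), "")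
          else (st.1, st.2.push c)) (kept, cur)).1).map String.toList)
      = kept.map String.toList ++ (splitTok cur.toList rest).filter
          (fun w => decide ((w.length : Int) > chiffre)) := by
  intro rest
  induction rest with
  | nil =>
    intro kept cur
    simp only [List.foldl_nil, splitTok, List.filter]
    have hl : cur.toList.length = cur.length := cur.length_toList
    by_cases h : (cur.toList.length : Int) > chiffre
    · have h2 : PySem.Str.len cur > chiffre := by rw [PySem.Str.len_eq]; exact h
      have h' : chiffre < (cur.length : Int) := by rw [← hl]; exact h
      rw [if_pos h2]
      simp [h']
    · have h2 : ¬ PySem.Str.len cur > chiffre := by rw [PySem.Str.len_eq]; exact h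
      have h' : ¬ chiffre < (cur.length : Int) := by rw [← hl]; exact h
      rw [if_neg h2]
      simp [h']
  | cons c cs ih =>
    intro kept cur
    simp only [List.foldl_cons]
    by_cases hd : c = ' ' ∨ c = ','
    · rw [if_pos hd, ih]
      simp only [splitTok, if_pos hd, List.filter_cons]
      have he : ("" : String).toList = [] := by decide
      have hl : cur.toList.length = cur.length := cur.length_toList
      by_cases h : (cur.toList.length : Int) > chiffre
      · have h2 : PySem.Str.len cur > chiffre := by rw [PySem.Str.len_eq]; exact h
        have h' : chiffre < (cur.length : Int) := by rw [← hl]; exact h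
        rw [if_pos h2]
        simp [h', he]
      · have h2 : ¬ PySem.Str.len cur > chiffre := by rw [PySem.Str.len_eq]; exact h
        have h' : ¬ chiffre < (cur.length : Int) := by rw [← hl]; exact h
        rw [if_neg h2]
        simp [h', he]
    · rw [if_neg hd, ih]
      simp [splitTok, hd, String.toList_push]

theorem flat_inter : ∀ ws : List (List Char),
    ws.flatMap (fun w => w ++ [' ']) =
      if ws = [] then [] else List.intercalate [' '] ws ++ [' '] := by
  intro ws
  induction ws with
  | nil => simp
  | cons x xs ih =>
    cases xs with
    | nil => simp [List.intercalate, List.intersperse]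
    | cons y ys =>
      simp only [List.flatMap_cons] at ih ⊢
      rw [ih]
      simp [List.intercalate, List.intersperse]

theorem rstrip_space (y : List Char) :
    PySem.Chars.rstrip (y ++ [' ']) = PySem.Chars.rstrip y := by
  simp [PySem.Chars.rstrip, List.reverse_append, PySem.Chars.isspace]

theorem strip_space (x : List Char) :
    PySem.Chars.strip (x ++ [' ']) = PySem.Chars.strip x := by
  simp only [PySem.Chars.strip, PySem.Chars.lstrip, List.dropWhile_append]
  split
  · next h =>
    simp only [List.isEmpty_iff] at h
    simp [h, PySem.Chars.isspace, PySem.Chars.rstrip]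
  · exact rstrip_space _

theorem strip_flat_join (ws : List (List Char)) :
    PySem.Chars.strip (ws.flatMap (fun w => w ++ [' '])) =
      PySem.Chars.strip (PySem.Chars.join [' '] ws) := by
  rw [flat_inter]
  by_cases h : ws = []
  · simp [h, PySem.Chars.join, List.intercalate]
  · rw [if_neg h, strip_space]
    rfl

-- ===== VERDICT (by name: the statement is the Claim_ definition above) =====
theorem decouper_spec : Claim_equal_decouper := by
  unfold Claim_equal_decouper
  intro chiffre ch _
  unfold Spec_decouper decouper decouper_alt
  dsimp only
  have he : ("" : String).toList = [] := by decide
  have hsep : (" " : String).toList = [' '] := by decide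
  have hA := loopA ch ch.toList.length 0 0 [] (by omega) (le_refl 0)
  simp only [Nat.cast_zero, List.drop_zero, List.map_nil, List.nil_append] at hA
  have hB := loopB chiffre ch.toList [] ""
  simp only [he, List.map_nil, List.nil_append] at hB
  simp only [PySem.Str.strip]
  rw [longueur_eq ch]
  refine congrArg String.ofList ?_
  rw [loopA2, he, List.nil_append, hA, PySem.Str.toList_join, hsep, hB]
  exact strip_flat_join _
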